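-- pv_equiv track=rewrite | github.com/TekMaTe-lux/Assistant-train | update_hafas_cache.py | _match_digits
-- ===== SOURCE A (Python) =====
-- from typing import Dict, Iterable, List, Optional, Tuple
--
-- def _match_digits(text: str, minimum: int) -> Optional[str]:
--     digits = ""
--     for ch in text:
--         if ch.isdigit():
--             digits += ch
--             if len(digits) >= minimum:
--                 return digits
--         else:
--             digits = ""
--     return None
-- ===== SOURCE B (Python) =====
-- from itertools import groupby
-- from typing import Optional
--
-- def _match_digits(text: str, minimum: int) -> Optional[str]:
--     k = minimum if minimum > 1 else 1
--     for is_digit, group in groupby(text, str.isdigit):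
--         if is_digit:
--             run = "".join(group)
--             if len(run) >= k:
--                 return run[:k]
--     return None
-- ===== Notes on version B (the rewrite author's own statement) =====
-- stated objective: idiomatic
-- what changed: Replaced char-by-char accumulation with early exit by an itertools.groupby pass that yields maximal digit runs, then returns the first run of length >= max(minimum,1) sliced to that length.
import Mathlib
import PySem

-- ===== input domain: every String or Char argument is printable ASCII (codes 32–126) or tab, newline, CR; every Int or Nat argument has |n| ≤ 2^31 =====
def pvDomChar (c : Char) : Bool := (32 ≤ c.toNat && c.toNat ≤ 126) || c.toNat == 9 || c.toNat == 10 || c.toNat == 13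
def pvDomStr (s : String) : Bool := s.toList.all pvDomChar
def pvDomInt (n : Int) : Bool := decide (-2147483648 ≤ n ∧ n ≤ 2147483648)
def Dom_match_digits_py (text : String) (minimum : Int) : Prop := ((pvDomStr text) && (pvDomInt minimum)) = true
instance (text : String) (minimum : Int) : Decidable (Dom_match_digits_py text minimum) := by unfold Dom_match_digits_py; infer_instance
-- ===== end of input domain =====

-- B replaces A's char-by-char accumulation with a groupby-into-digit-runs pass (idiomatic, same cost).

-- ===== PORT A =====
-- A's loop: accumulate consecutive digits, return as soon as the accumulator reaches `minimum`.
def pvGoA (minimum : Int) : List Char → List Char → Option (List Char)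
  | [], _ => none
  | c :: cs, digits =>
    if PySem.Chars.isdigit c then
      let d := digits ++ [c]
      if minimum ≤ (d.length : Int) then some d else pvGoA minimum cs d
    else
      pvGoA minimum cs []

def match_digits_py (text : String) (minimum : Int) : Option String :=
  (pvGoA minimum text.toList []).map String.mk

-- ===== PORT B =====
-- groupby(text, str.isdigit) restricted to the digit groups: the maximal digit runs, in order.
def pvRuns : List Char → List (List Char)
  | [] => []
  | c :: cs =>
    if PySem.Chars.isdigit c then
      (c :: cs.takeWhile PySem.Chars.isdigit) :: pvRuns (cs.dropWhile PySem.Chars.isdigit)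
    else
      pvRuns cs
termination_by cs => cs.length
decreasing_by
  · exact Nat.lt_succ_of_le (List.length_dropWhile_le _ _)
  · simp

-- the loop over runs: first run with len(run) >= k, sliced to k
def pvGoB (k : Nat) : List (List Char) → Option (List Char)
  | [] => none
  | r :: rs => if k ≤ r.length then some (r.take k) else pvGoB k rs

def match_digits_py_alt (text : String) (minimum : Int) : Option String :=
  let k : Nat := (if minimum > 1 then minimum else 1).toNat
  (pvGoB k (pvRuns text.toList)).map String.mk

-- ===== PRECONDITION & SPEC =====
def Spec_match_digits_py (text : String) (minimum : Int) (out : Option String) : Prop := out = match_digits_py_alt text minimum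
instance (text : String) (minimum : Int) (out : Option String) : Decidable (Spec_match_digits_py text minimum out) := by unfold Spec_match_digits_py; infer_instance

-- ===== CLAIM (what is proved, stated in full; the proofs are below) =====
def Claim_equal_match_digits_py : Prop := ∀ (text : String) (minimum : Int), Dom_match_digits_py text minimum → Spec_match_digits_py text minimum (match_digits_py text minimum)

-- ===== LEMMAS AND PROOFS =====

-- unfolding pvGoB over pvRuns one "run step" at a time
lemma pvGoB_runs_step (k : Nat) (hk : 1 ≤ k) (cs : List Char) :
    pvGoB k (pvRuns cs) =
      if k ≤ (cs.takeWhile PySem.Chars.isdigit).length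
      then some ((cs.takeWhile PySem.Chars.isdigit).take k)
      else pvGoB k (pvRuns (cs.dropWhile PySem.Chars.isdigit)) := by
  cases cs with
  | nil =>
    simp only [pvRuns, List.takeWhile_nil, List.dropWhile_nil, List.length_nil]
    rw [if_neg (by omega)]
  | cons c cs =>
    by_cases h : PySem.Chars.isdigit c
    · rw [List.takeWhile_cons_of_pos h, List.dropWhile_cons_of_pos h]
      simp [pvRuns, h, pvGoB]
    · rw [List.takeWhile_cons_of_neg (by simpa using h),
          List.dropWhile_cons_of_neg (by simpa using h)]
      simp only [List.length_nil]
      rw [if_neg (by omega)]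

-- main invariant: A's loop with accumulator d equals "finish the current run, else B on the rest"
lemma pvGoA_eq (minimum : Int) (k : Nat) (hk : k = (if minimum > 1 then minimum else 1).toNat) :
    ∀ (cs d : List Char), d.length < k →
      pvGoA minimum cs d =
        if k ≤ d.length + (cs.takeWhile PySem.Chars.isdigit).length
        then some (d ++ (cs.takeWhile PySem.Chars.isdigit).take (k - d.length))
        else pvGoB k (pvRuns (cs.dropWhile PySem.Chars.isdigit)) := by
  have hiff : ∀ j : Nat, 1 ≤ j → (minimum ≤ (j : Int) ↔ k ≤ j) := by
    intro j hj
    rw [hk]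
    split <;> omega
  have hk1 : 1 ≤ k := by
    rw [hk]; split <;> omega
  intro cs
  induction cs with
  | nil =>
    intro d hd
    simp only [pvGoA, pvRuns, pvGoB, List.takeWhile_nil, List.dropWhile_nil,
      List.length_nil, Nat.add_zero]
    rw [if_neg (by omega)]
  | cons c cs ih =>
    intro d hd
    by_cases h : PySem.Chars.isdigit c
    · have hcond : (minimum ≤ ((d.length : Int) + 1)) ↔ k ≤ d.length + 1 := by
        have := hiff (d.length + 1) (by omega)
        push_cast at this
        omega
      rw [List.takeWhile_cons_of_pos h, List.dropWhile_cons_of_pos h]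
      by_cases hret : k ≤ d.length + 1
      · have hra : minimum ≤ (d.length : Int) + 1 := hcond.mpr hret
        have hkd : k - d.length = 1 := by omega
        rw [show pvGoA minimum (c :: cs) d = some (d ++ [c]) by
              simp [pvGoA, h]; intro hx; exfalso; omega]
        rw [if_pos (by simp; omega)]
        simp [hkd]
      · have hnm : ¬ minimum ≤ (d.length : Int) + 1 := fun hh => hret (hcond.mp hh)
        have hd' : (d ++ [c]).length < k := by simp; omega
        rw [show pvGoA minimum (c :: cs) d = pvGoA minimum cs (d ++ [c]) by
              simp [pvGoA, h]; intro hx; exfalso; omega]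
        rw [ih (d ++ [c]) hd']
        by_cases hc2 : k ≤ d.length + (c :: cs.takeWhile PySem.Chars.isdigit).length
        · rw [if_pos (by simp at hc2 ⊢; omega), if_pos hc2]
          have hk2 : k - d.length = (k - (d ++ [c]).length) + 1 := by simp; omega
          simp [hk2, List.take_succ_cons]
        · rw [if_neg (by simp at hc2 ⊢; omega), if_neg hc2]
    · rw [List.takeWhile_cons_of_neg (by simpa using h),
          List.dropWhile_cons_of_neg (by simpa using h)]
      rw [show pvRuns (c :: cs) = pvRuns cs by simp [pvRuns, h]]
      simp only [List.length_nil, Nat.add_zero]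
      rw [if_neg (by omega)]
      rw [show pvGoA minimum (c :: cs) d = pvGoA minimum cs [] by simp [pvGoA, h]]
      rw [ih [] (by simpa using hk1), pvGoB_runs_step k hk1 cs]
      simp

-- ===== VERDICT (by name: the statement is the Claim_ definition above) =====
theorem match_digits_py_spec : Claim_equal_match_digits_py := by
  intro text minimum _
  unfold Spec_match_digits_py match_digits_py match_digits_py_alt
  have hk1 : 1 ≤ ((if minimum > 1 then minimum else 1).toNat) := by
    split <;> omega
  show Option.map String.mk (pvGoA minimum text.toList []) =
    Option.map String.mk (pvGoB ((if minimum > 1 then minimum else 1).toNat) (pvRuns text.toList))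
  rw [pvGoA_eq minimum _ rfl text.toList [] (by simp only [List.length_nil]; exact hk1)]
  rw [pvGoB_runs_step _ hk1 text.toList]
  simp
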